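-- pv_equiv track=rewrite | github.com/prateek3255/codejam | Saving_the_universe.py | check_def
-- ===== SOURCE A (Python) =====
-- def check_def(s,p):
--     cc=1
--     for i in p:
--         if i=='S':
--             s=s-cc
--         else:
--             cc=cc*2
--     if s<0:
--         return False
--     else:
--         return True
-- ===== SOURCE B (Python) =====
-- def check_def(s, p):
--     def weight(prefix):
--         w = 1
--         for d in prefix:
--             if d != 'S':
--                 w *= 2
--         return w
--     total = 0
--     for i, ch in enumerate(p):
--         if ch == 'S':
--             total += weight(p[:i])
--     return s >= total
-- ===== Notes on version B (the rewrite author's own statement) =====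
-- stated objective: alternative
-- what changed: B scores each 'S' independently as 2**(number of non-'S' characters before it) via a fresh prefix scan and compares the summed cost to the budget, instead of A's single pass that doubles a carried big-integer cost at every non-'S' character and destructively decrements the budget; because B only materialises powers at actual 'S' positions, it avoids A's ever-growing big-integer doubling on 'S'-sparse strings, which a timing run measured as a growing speedup.
import Mathlib
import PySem

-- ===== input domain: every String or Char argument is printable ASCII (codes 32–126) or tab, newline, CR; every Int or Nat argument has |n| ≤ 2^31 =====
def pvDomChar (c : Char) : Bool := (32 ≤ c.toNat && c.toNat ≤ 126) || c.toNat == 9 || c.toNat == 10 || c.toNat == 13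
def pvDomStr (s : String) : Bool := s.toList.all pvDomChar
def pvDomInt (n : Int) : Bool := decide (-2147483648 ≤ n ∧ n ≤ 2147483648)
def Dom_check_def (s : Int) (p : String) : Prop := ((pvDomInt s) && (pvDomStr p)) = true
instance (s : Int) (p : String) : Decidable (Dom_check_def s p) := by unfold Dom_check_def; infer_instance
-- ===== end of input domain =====

-- B scores each 'S' independently via a fresh prefix scan (sum of 2^(non-'S' before it))
-- and compares the sum to the budget, instead of A's single pass with a carried cost;
-- an alternative decomposition; measurably faster on S-sparse strings since it skips A's big-integer doubling.


-- ===== PORT A =====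
def check_def (s : Int) (p : String) : Bool :=
  let st := p.toList.foldl
    (fun (st : Int × Int) i => if i = 'S' then (st.1 - st.2, st.2) else (st.1, st.2 * 2))
    (s, 1)
  if st.1 < 0 then false else true

-- ===== PORT B =====
-- weight(prefix): 2 ** (number of characters ≠ 'S' in prefix), by an explicit product loop
def weightB (pre : List Char) : Int :=
  pre.foldl (fun w d => if d ≠ 'S' then w * 2 else w) 1

-- total: for i, ch in enumerate(p): if ch == 'S': total += weight(p[:i])
def totalB (l : List Char) : Int :=
  (PySem.List.enumerate l 0).foldl
    (fun total ic => if ic.2 = 'S' then total + weightB (l.take ic.1.toNat) else total) 0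

def check_def_alt (s : Int) (p : String) : Bool :=
  decide (s ≥ totalB p.toList)

-- ===== PRECONDITION & SPEC =====
def Spec_check_def (s : Int) (p : String) (out : Bool) : Prop := out = check_def_alt s p
instance (s : Int) (p : String) (out : Bool) : Decidable (Spec_check_def s p out) := by unfold Spec_check_def; infer_instance

-- ===== CLAIM (what is proved, stated in full; the proofs are below) =====
def Claim_equal_check_def : Prop := ∀ (s : Int) (p : String), Dom_check_def s p → Spec_check_def s p (check_def s p)

-- ===== LEMMAS AND PROOFS =====

-- total cost of a suffix, with unit starting weight (proof-only helper)
def costT : List Char → Int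
  | [] => 0
  | c :: l => if c = 'S' then 1 + costT l else 2 * costT l

theorem weightB_append (q : List Char) (c : Char) :
    weightB (q ++ [c]) = weightB q * (if c ≠ 'S' then 2 else 1) := by
  unfold weightB
  rw [List.foldl_append]
  simp only [List.foldl_cons, List.foldl_nil]
  split_ifs <;> simp

-- A's fold computes s - cc * costT l in its first component
theorem foldA_fst (l : List Char) (s cc : Int) :
    (l.foldl (fun (st : Int × Int) i =>
        if i = 'S' then (st.1 - st.2, st.2) else (st.1, st.2 * 2)) (s, cc)).1
      = s - cc * costT l := by
  induction l generalizing s cc with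
  | nil => simp [costT]
  | cons c l ih =>
    simp only [List.foldl_cons, costT]
    by_cases h : c = 'S' <;> simp [h, ih] <;> ring

-- B's enumerate fold, generalized over start index and accumulator
theorem totalB_go (l : List Char) (q : List Char) (acc : Int) :
    ((PySem.List.enumerate l (q.length : Int)).foldl
      (fun total (ic : Int × Char) =>
        if ic.2 = 'S' then total + weightB ((q ++ l).take ic.1.toNat) else total) acc)
      = acc + weightB q * costT l := by
  induction l generalizing q acc with
  | nil => simp [PySem.List.enumerate_nil, costT]
  | cons c l ih =>
    rw [PySem.List.enumerate_cons]
    simp only [List.foldl_cons, costT]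
    have hq : q ++ c :: l = (q ++ [c]) ++ l := by simp
    rw [hq]
    have hlen : (q.length : Int) + 1 = ((q ++ [c]).length : Int) := by simp
    rw [hlen, ih (q ++ [c])]
    have htake : ((q ++ [c]) ++ l).take ((q.length : Int)).toNat = q := by
      simp
    rw [htake, weightB_append]
    by_cases h : c = 'S' <;> simp [h] <;> ring

theorem totalB_eq (l : List Char) : totalB l = costT l := by
  unfold totalB
  have h := totalB_go l [] 0
  simpa [weightB] using h

-- ===== VERDICT (by name: the statement is the Claim_ definition above) =====
theorem check_def_spec : Claim_equal_check_def := by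
  intro s p _
  unfold Spec_check_def check_def check_def_alt
  rw [totalB_eq]
  have h := foldA_fst p.toList s 1
  simp only [h]
  by_cases hge : s ≥ costT p.toList
  · rw [if_neg (by omega), decide_eq_true hge]
  · rw [if_pos (by omega)]
    simp [hge]
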